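-- pv_equiv track=rewrite | github.com/Toughie17/Algorithms | 프로그래머스/unrated/181926. 수 조작하기 1/수 조작하기 1.py | solution
-- ===== SOURCE A (Python) =====
-- def solution(n, control):
--
--     answer = n
--
--     for con in control:
--         if con == "w":
--             answer += 1
--         elif con == 's':
--             answer -= 1
--         elif con == 'd':
--             answer += 10
--         else:
--             answer -= 10
--
--     return answer
-- ===== SOURCE B (Python) =====
-- def _offset(s):
--     if not s:
--         return 0
--     if len(s) == 1:
--         if s == 'w':
--             return 1
--         if s == 's':
--             return -1
--         if s == 'd':
--             return 10
--         return -10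
--     m = len(s) // 2
--     return _offset(s[:m]) + _offset(s[m:])
--
-- def solution(n, control):
--     return n + _offset(control)
-- ===== Notes on version B (the rewrite author's own statement) =====
-- stated objective: alternative
-- what changed: Replaces the sequential accumulator loop with a divide-and-conquer recursion that computes the string's total offset by splitting it into halves (valid since per-character contributions are independent and addition is associative), adding it to n once at the end.
import Mathlib
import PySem

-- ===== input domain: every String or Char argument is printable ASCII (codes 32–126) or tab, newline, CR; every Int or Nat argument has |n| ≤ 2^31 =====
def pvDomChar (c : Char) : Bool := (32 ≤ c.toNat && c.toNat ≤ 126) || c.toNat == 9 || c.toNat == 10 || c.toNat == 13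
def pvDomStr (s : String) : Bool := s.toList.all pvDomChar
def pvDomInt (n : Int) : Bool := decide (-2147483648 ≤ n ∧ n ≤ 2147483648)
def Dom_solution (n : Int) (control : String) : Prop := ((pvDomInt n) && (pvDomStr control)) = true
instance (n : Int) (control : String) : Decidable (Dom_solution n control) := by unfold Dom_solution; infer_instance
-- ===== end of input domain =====

-- B replaces A's sequential accumulator loop by a divide-and-conquer recursion that splits
-- the control string in halves and sums the two offsets (objective: alternative, same cost).

-- ===== PORT A =====
def solution (n : Int) (control : String) : Int :=
  control.toList.foldl (fun answer con =>
    if con == 'w' then answer + 1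
    else if con == 's' then answer - 1
    else if con == 'd' then answer + 10
    else answer - 10) n

-- ===== PORT B =====
-- _offset from Source B: divide-and-conquer on the character list (s[:m] / s[m:] → take / drop)
def offsetB (l : List Char) : Int :=
  if l.isEmpty then 0
  else if l.length = 1 then
    (if l = ['w'] then 1 else if l = ['s'] then -1 else if l = ['d'] then 10 else -10)
  else
    let m := l.length / 2
    offsetB (l.take m) + offsetB (l.drop m)
termination_by l.length
decreasing_by
  all_goals
    simp only [List.length_take, List.length_drop]
    rename_i h0 h1
    simp [List.isEmpty_iff] at h0
    have := List.length_pos_of_ne_nil h0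
    omega

def solution_alt (n : Int) (control : String) : Int :=
  n + offsetB control.toList

-- ===== PRECONDITION & SPEC =====
def Spec_solution (n : Int) (control : String) (out : Int) : Prop := out = solution_alt n control
instance (n : Int) (control : String) (out : Int) : Decidable (Spec_solution n control out) := by unfold Spec_solution; infer_instance

-- ===== CLAIM =====
def Claim_equal_solution : Prop := ∀ (n : Int) (control : String), Dom_solution n control → Spec_solution n control (solution n control)

-- ===== LEMMAS AND PROOFS =====

def deltaC (c : Char) : Int :=
  if c = 'w' then 1 else if c = 's' then -1 else if c = 'd' then 10 else -10

theorem offsetB_eq_sum (l : List Char) : offsetB l = (l.map deltaC).sum := by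
  induction l using offsetB.induct with
  | case1 x h0 => simp_all [offsetB, List.isEmpty_iff]
  | case2 h0 h1 => rw [offsetB]; simp [deltaC]
  | case3 h0 h1 h2 => rw [offsetB]; simp [deltaC]
  | case4 h0 h1 h2 h3 => rw [offsetB]; simp [deltaC]
  | case5 x h0 h1 hw hs hd =>
    obtain ⟨c, rfl⟩ : ∃ c, x = [c] := by
      cases x with
      | nil => simp at h0
      | cons a t =>
        cases t with
        | nil => exact ⟨a, rfl⟩
        | cons b u => simp at h1
    rw [offsetB]
    simp only [List.cons.injEq, and_true] at hw hs hd
    simp [h1, deltaC, hw, hs, hd]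
  | case6 x h0 h1 m iht ihd =>
    rw [offsetB]
    rw [if_neg h0, if_neg h1]
    show offsetB (x.take m) + offsetB (x.drop m) = (x.map deltaC).sum
    rw [iht, ihd]
    conv_rhs => rw [(List.take_append_drop m x).symm]
    rw [List.map_append, List.sum_append]

theorem foldl_eq_sum (l : List Char) (n : Int) :
    l.foldl (fun answer con =>
      if con == 'w' then answer + 1
      else if con == 's' then answer - 1
      else if con == 'd' then answer + 10
      else answer - 10) n = n + (l.map deltaC).sum := by
  induction l generalizing n with
  | nil => simp
  | cons c t ih =>
    rw [List.foldl_cons, ih]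
    simp only [List.map_cons, List.sum_cons, deltaC, beq_iff_eq]
    split_ifs <;> ring

-- ===== VERDICT =====
theorem solution_spec : Claim_equal_solution := by
  intro n control _
  show solution n control = solution_alt n control
  unfold solution solution_alt
  rw [foldl_eq_sum, offsetB_eq_sum]
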